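-- pv_equiv track=rewrite | github.com/Shenchen-Liu/Mechanism-resolved-design-of-disk-TENGs | figures_publication/src/fig01_workflow_support/generate_fig01_editable_drawio.py | _split_style
-- ===== SOURCE A (Python) =====
-- def _split_style(style: str) -> tuple[list[str], dict[str, str], list[str]]:
--     order: list[str] = []
--     mapping: dict[str, str] = {}
--     flags: list[str] = []
--     for part in [item for item in style.split(";") if item]:
--         if "=" not in part:
--             flags.append(part)
--             continue
--         key, value = part.split("=", 1)
--         if key not in mapping:
--             order.append(key)
--         mapping[key] = value
--     return order, mapping, flags
-- ===== SOURCE B (Python) =====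
-- def _split_style(style: str) -> tuple[list[str], dict[str, str], list[str]]:
--     parts = [p for p in style.split(";") if p]
--     flags = [p for p in parts if "=" not in p]
--     kvs = [tuple(p.split("=", 1)) for p in parts if "=" in p]
--     order = list(dict.fromkeys(k for k, _ in kvs))
--     mapping = {k: [v for kk, v in kvs if kk == k][-1] for k in order}
--     return order, mapping, flags
-- ===== Notes on version B (the rewrite author's own statement) =====
-- stated objective: alternative
-- what changed: B replaces A's single accumulating loop (order/mapping/flags state with a 'key not in mapping' guard and in-place dict overwrites) by staged comprehensions: split parts once, filter flags and key=value pairs separately, dedup keys via dict.fromkeys for the order, and build the mapping by a per-key scan taking the last value for each key; it trades the one-pass fold for O(n*k) staged passes.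
import Mathlib
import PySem

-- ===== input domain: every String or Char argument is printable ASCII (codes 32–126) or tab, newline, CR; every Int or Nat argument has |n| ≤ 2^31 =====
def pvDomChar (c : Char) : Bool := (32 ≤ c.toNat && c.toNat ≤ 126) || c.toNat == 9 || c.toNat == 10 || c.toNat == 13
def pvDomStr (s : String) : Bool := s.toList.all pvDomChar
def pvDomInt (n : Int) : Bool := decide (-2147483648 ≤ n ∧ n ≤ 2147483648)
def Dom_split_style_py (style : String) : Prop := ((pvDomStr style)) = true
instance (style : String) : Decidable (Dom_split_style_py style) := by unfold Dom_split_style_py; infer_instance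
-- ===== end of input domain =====

-- B replaces A's single accumulating loop by staged comprehensions: flags and key=value
-- pairs filtered separately, order = dict.fromkeys dedup of the keys, and the mapping
-- rebuilt per key by taking the last value — same result, a different decomposition.

-- ===== PORT A =====
-- loop body of A: state (order, mapping, flags); part.split("=", 1) via PySem.Str.splitMax?
def splitStyleStepA (st : List String × PySem.Dict String String × List String)
    (part : String) : List String × PySem.Dict String String × List String :=
  if ¬ (PySem.Str.isIn "=" part = true) then
    (st.1, st.2.1, st.2.2 ++ [part])
  else
    match PySem.Str.splitMax? part "=" 1 with
    | some (key :: value :: _) =>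
        ((if st.2.1.contains key then st.1 else st.1 ++ [key]), st.2.1.insert key value, st.2.2)
    | _ => st

def split_style_py (style : String) : List String × (List (String × String)) × List String :=
  let r := (((PySem.Str.split? style ";").getD []).filter (fun item => item ≠ "")).foldl
    splitStyleStepA ([], PySem.Dict.empty, [])
  (r.1, r.2.1.items, r.2.2)

-- ===== PORT B =====
-- part.split("=", 1) on a part containing "=" is exactly two pieces (the tuple (k, v));
-- the other match arms are unreachable then
def splitStyleKV (p : String) : Option (String × String) :=
  if PySem.Str.isIn "=" p then
    match PySem.Str.splitMax? p "=" 1 with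
    | some (k :: v :: _) => some (k, v)
    | _ => none
  else none

def split_style_py_alt (style : String) : List String × (List (String × String)) × List String :=
  let parts := ((PySem.Str.split? style ";").getD []).filter (fun p => p ≠ "")
  let flags := parts.filter (fun p => !(PySem.Str.isIn "=" p))
  let kvs := parts.filterMap splitStyleKV
  let order := PySem.List.dedup (kvs.map Prod.fst)
  -- [v for kk, v in kvs if kk == k][-1]: the list is nonempty for k ∈ order, so the
  -- Python [-1] never raises; getLast?.getD "" is that last element
  let mapping := order.map (fun k =>
    (k, ((kvs.filter (fun kv => kv.1 == k)).map Prod.snd).getLast?.getD ""))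
  (order, mapping, flags)

-- ===== PRECONDITION & SPEC =====
def Spec_split_style_py (style : String) (out : List String × (List (String × String)) × List String) : Prop := out = split_style_py_alt style
instance (style : String) (out : List String × (List (String × String)) × List String) : Decidable (Spec_split_style_py style out) := by unfold Spec_split_style_py; infer_instance

-- ===== CLAIM (what is proved, stated in full; the proofs are below) =====
def Claim_equal_split_style_py : Prop := ∀ (style : String), Dom_split_style_py style → Spec_split_style_py style (split_style_py style)

-- ===== LEMMAS AND PROOFS =====

-- A's loop, started with order = d.keys, is the key=value insert-fold plus the flag filter
lemma foldA_char (parts : List String) (d : PySem.Dict String String) (f : List String) :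
    parts.foldl splitStyleStepA (d.keys, d, f)
      = (((parts.filterMap splitStyleKV).foldl (fun d p => d.insert p.1 p.2) d).keys,
         (parts.filterMap splitStyleKV).foldl (fun d p => d.insert p.1 p.2) d,
         f ++ parts.filter (fun p => !(PySem.Str.isIn "=" p))) := by
  induction parts generalizing d f with
  | nil => simp
  | cons p ps ih =>
    by_cases h : PySem.Str.isIn "=" p = true
    · have h2 : PySem.Chars.isIn ['='] p.toList = true := by simpa using h
      cases hsp : PySem.Str.splitMax? p "=" 1 with
      | none => simpa [splitStyleStepA, splitStyleKV, h, h2, hsp] using ih d f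
      | some l =>
        match l with
        | [] => simpa [splitStyleStepA, splitStyleKV, h, h2, hsp] using ih d f
        | [k] => simpa [splitStyleStepA, splitStyleKV, h, h2, hsp] using ih d f
        | (k :: v :: rest) =>
          by_cases hc : d.contains k
          · have e1 : (d.insert k v).keys = d.keys :=
              PySem.Dict.keys_insert_of_contains d v hc
            simpa [splitStyleStepA, splitStyleKV, h, h2, hsp, hc, e1] using ih (d.insert k v) f
          · have e1 : (d.insert k v).keys = d.keys ++ [k] :=
              PySem.Dict.keys_insert_of_not_contains d v (by simpa using hc)
            simpa [splitStyleStepA, splitStyleKV, h, h2, hsp, hc, e1] using ih (d.insert k v) f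
    · have h2 : PySem.Chars.isIn ['='] p.toList = false := by simpa using h
      simpa [splitStyleStepA, splitStyleKV, h2] using ih d (f ++ [p])

-- the insert-fold's lookup is the LAST value paired with the key (Python's [-1])
lemma getD_foldl_insert_last (l : List (String × String)) (d : PySem.Dict String String)
    (k : String) (dflt : String) :
    (l.foldl (fun d p => d.insert p.1 p.2) d).getD k dflt
      = ((l.filter (fun p => p.1 == k)).map Prod.snd).getLast?.getD (d.getD k dflt) := by
  induction l generalizing d with
  | nil => simp
  | cons p ps ih =>
    simp only [List.foldl_cons, List.filter_cons]
    by_cases h : p.1 = k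
    · rw [if_pos (by simpa using h), ih]
      simp only [List.map_cons, List.getLast?_cons]
      rw [h, PySem.Dict.getD_insert_self]
      cases ((ps.filter (fun p => p.1 == k)).map Prod.snd).getLast? <;> simp
    · rw [if_neg (by simpa using h), ih,
        PySem.Dict.getD_insert_of_ne d p.2 dflt (fun hh => h hh.symm)]

-- ===== VERDICT (by name: the statement is the Claim_ definition above) =====
theorem split_style_py_spec : Claim_equal_split_style_py := by
  intro style _
  unfold Spec_split_style_py split_style_py split_style_py_alt
  set parts := ((PySem.Str.split? style ";").getD []).filter (fun p => p ≠ "") with hparts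
  set kvs := parts.filterMap splitStyleKV with hkvs
  have hA := foldA_char parts PySem.Dict.empty []
  simp only [PySem.Dict.keys_empty, List.nil_append, ← hkvs] at hA
  have hkeys : (kvs.foldl (fun d p => d.insert p.1 p.2) PySem.Dict.empty).keys
      = PySem.List.dedup (kvs.map Prod.fst) := by
    rw [PySem.List.dedup_eq_ofList,
      PySem.Dict.keys_foldl_insert_key kvs Prod.fst (fun _ p => p.2) PySem.Dict.empty,
      PySem.Dict.keys_empty, PySem.Set.update_nil_left]
  have hnd : (kvs.foldl (fun d p => d.insert p.1 p.2) PySem.Dict.empty).keys.Nodup :=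
    PySem.Dict.nodup_keys_foldl_insert_key kvs Prod.fst (fun _ p => p.2) PySem.Dict.empty
      (by simp)
  have hitems : (kvs.foldl (fun d p => d.insert p.1 p.2) PySem.Dict.empty).items
      = (PySem.List.dedup (kvs.map Prod.fst)).map (fun k =>
          (k, ((kvs.filter (fun kv => kv.1 == k)).map Prod.snd).getLast?.getD "")) := by
    rw [PySem.Dict.items_eq_map_keys _ hnd "", hkeys]
    refine List.map_congr_left (fun k _ => ?_)
    rw [getD_foldl_insert_last, PySem.Dict.getD_empty]
  rw [hA, hkeys]
  dsimp only
  rw [hitems]
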